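-- pv_equiv track=rewrite | github.com/YueXiao1995/algorithm | LeetCode-Python/Interview example.py | f
-- ===== SOURCE A (Python) =====
-- def f(S, T):
--     num_of_t_in_s = 0
--     result = list()
--     l = len(T)
--     for i in range(len(S)):
--         if i >= l-1:
--             if S[i-l+1:i+1] == T:
--                 num_of_t_in_s += 1
--         result.append(str(num_of_t_in_s))
--     #result = (" ").join(result)
--     return result
-- ===== SOURCE B (Python) =====
-- def f(S, T):
--     l = len(T)
--     if l == 0:
--         return [str(i + 1) for i in range(len(S))]
--     mask = {}
--     for j, ch in enumerate(T):
--         mask[ch] = mask.get(ch, 0) | (1 << j)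
--     hit = 1 << (l - 1)
--     D = 0
--     count = 0
--     out = []
--     for c in S:
--         D = ((D << 1) | 1) & mask.get(c, 0)
--         if D & hit:
--             count += 1
--         out.append(str(count))
--     return out
-- ===== Notes on version B (the rewrite author's own statement) =====
-- stated objective: alternative
-- what changed: B replaces A's per-index slicing S[i-l+1:i+1]==T with bit-parallel Shift-And matching: a per-character bitmask table built from T once, then one shift/or/and per character of S with the top bit signalling a match.
import Mathlib
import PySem

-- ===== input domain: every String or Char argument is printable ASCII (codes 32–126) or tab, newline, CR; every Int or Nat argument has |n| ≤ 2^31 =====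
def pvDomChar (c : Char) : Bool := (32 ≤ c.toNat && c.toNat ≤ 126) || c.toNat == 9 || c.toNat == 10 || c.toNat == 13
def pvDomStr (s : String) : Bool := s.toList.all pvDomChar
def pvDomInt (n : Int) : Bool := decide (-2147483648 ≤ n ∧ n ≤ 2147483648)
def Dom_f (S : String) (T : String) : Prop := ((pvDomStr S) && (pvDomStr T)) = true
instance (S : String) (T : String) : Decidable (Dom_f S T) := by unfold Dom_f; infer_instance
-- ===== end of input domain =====

-- B replaces A's per-index slice comparison with bit-parallel Shift-And matching (a per-char
-- bitmask table built from T, then one shift/or/and per character of S); objective: alternative.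

-- ===== PORT A =====
-- A's loop body: one step of the fold over range(len(S)); state = (num_of_t_in_s, result)
def fStep (cs : List Char) (t : List Char) (st : Int × List String) (i : Int) : Int × List String :=
  let l : Int := PySem.Chars.len t
  let num := if l - 1 ≤ i then
      (if PySem.List.slice cs (some (i - l + 1)) (some (i + 1)) = t then st.1 + 1 else st.1)
    else st.1
  (num, st.2 ++ [PySem.Int.toStr num])

def f (S : String) (T : String) : List String :=
  ((PySem.List.pyRange 0 (PySem.Chars.len S.toList) 1).foldl (fStep S.toList T.toList) (0, [])).2

-- ===== PORT B =====
-- mask[ch] = or of bits 1<<j over positions j with T[j] = ch.  The Python values here are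
-- nonnegative ints (bitmasks), so they are carried as Nat; enumerate indices are ≥ 0, whence .toNat is exact.
def fAltMask (t : List Char) : PySem.Dict Char Nat :=
  (PySem.List.enumerate t 0).foldl
    (fun d jc => d.insert jc.2 ((d.getD jc.2 0) ||| (1 <<< jc.1.toNat))) PySem.Dict.empty

-- B's loop body: state = (D, count, out); 'if D & hit:' is the truthiness test D &&& hit ≠ 0
def fAltStep (mask : PySem.Dict Char Nat) (hit : Nat) (st : Nat × Int × List String) (c : Char) :
    Nat × Int × List String :=
  let D := ((st.1 <<< 1) ||| 1) &&& mask.getD c 0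
  let count := if D &&& hit ≠ 0 then st.2.1 + 1 else st.2.1
  (D, count, st.2.2 ++ [PySem.Int.toStr count])

def f_alt (S : String) (T : String) : List String :=
  let t := T.toList
  let l := t.length
  if l = 0 then
    (PySem.List.pyRange 0 (PySem.Chars.len S.toList) 1).map (fun i => PySem.Int.toStr (i + 1))
  else
    (S.toList.foldl (fAltStep (fAltMask t) (1 <<< (l - 1))) (0, 0, [])).2.2

-- ===== PRECONDITION & SPEC =====
def Spec_f (S : String) (T : String) (out : List String) : Prop := out = f_alt S T
instance (S : String) (T : String) (out : List String) : Decidable (Spec_f S T out) := by unfold Spec_f; infer_instance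

-- ===== CLAIM (what is proved, stated in full; the proofs are below) =====
def Claim_equal_f : Prop := ∀ (S : String) (T : String), Dom_f S T → Spec_f S T (f S T)

-- ===== LEMMAS AND PROOFS =====

-- the window of the last len(t) characters among the first k of cs
def pvWindow (cs t : List Char) (k : Nat) : List Char :=
  (cs.take k).drop (k - t.length)

theorem pv_take_succ (cs : List Char) (k : Nat) (hk : k < cs.length) :
    cs.take (k+1) = cs.take k ++ [cs[k]] := by
  rw [List.take_add_one]; simp [List.getElem?_eq_getElem hk]

-- bits of the mask fold: bit j of mask[c] is set iff it was set initially or (j, c) is enumerated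
theorem pv_mask_fold (t : List Char) (s : Nat) (d : PySem.Dict Char Nat) (c : Char) (j : Nat) :
    (((PySem.List.enumerate t (s : Int)).foldl
        (fun d jc => d.insert jc.2 ((d.getD jc.2 0) ||| (1 <<< jc.1.toNat))) d).getD c 0).testBit j
      = true
    ↔ ((d.getD c 0).testBit j = true ∨ (((j : Int), c) ∈ PySem.List.enumerate t (s : Int))) := by
  induction t generalizing s d with
  | nil => simp [PySem.List.enumerate_nil]
  | cons a t ih =>
    rw [PySem.List.enumerate_cons, List.foldl_cons, List.mem_cons]
    have hs1 : ((s : Int) + 1) = ((s + 1 : Nat) : Int) := by push_cast; ring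
    rw [hs1, ih (s+1)]
    dsimp only
    have htn : ((s : Int)).toNat = s := by omega
    rw [htn]
    have hd : ((d.insert a ((d.getD a 0) ||| (1 <<< s))).getD c 0).testBit j = true
        ↔ ((d.getD c 0).testBit j = true ∨ ((j : Int) = (s : Int) ∧ c = a)) := by
      rw [PySem.Dict.getD_insert]
      by_cases hc : c = a
      · subst hc
        rw [if_pos rfl, Nat.testBit_or, Nat.shiftLeft_eq, one_mul, Nat.testBit_two_pow]
        simp only [Bool.or_eq_true, decide_eq_true_eq, and_true]
        constructor
        · rintro (h | h)
          · exact Or.inl h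
          · right; omega
        · rintro (h | h)
          · exact Or.inl h
          · right; omega
      · rw [if_neg hc]
        simp [hc]
    rw [hd, Prod.mk.injEq]
    tauto

theorem pv_mask_bit (t : List Char) (c : Char) (j : Nat) :
    ((fAltMask t).getD c 0).testBit j = true ↔ t[j]? = some c := by
  unfold fAltMask
  rw [show (0 : Int) = ((0 : Nat) : Int) from rfl, pv_mask_fold t 0 PySem.Dict.empty c j,
      PySem.List.mem_enumerate_iff]
  simp only [PySem.Dict.getD_empty, Nat.zero_testBit, Bool.false_eq_true, false_or]
  constructor
  · rintro ⟨k, hk, hp⟩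
    rw [Prod.mk.injEq] at hp
    obtain ⟨hjk, hcv⟩ := hp
    have hj : j = k := by omega
    subst hj
    rw [List.getElem?_eq_getElem hk, hcv]
  · intro h
    obtain ⟨hlt, he⟩ := List.getElem?_eq_some_iff.mp h
    exact ⟨j, hlt, by rw [Prod.mk.injEq]; exact ⟨by omega, he.symm⟩⟩

-- the Shift-And invariant: bit j of D is set after k characters iff T's prefix of length j+1
-- equals the last j+1 of the processed k characters
def pvInv (cs t : List Char) (k : Nat) (D : Nat) : Prop :=
  ∀ j : Nat, D.testBit j = true ↔
    (j < t.length ∧ j + 1 ≤ k ∧ t.take (j + 1) = (cs.take k).drop (k - (j + 1)))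

theorem pv_inv_zero (cs t : List Char) : pvInv cs t 0 0 := by
  unfold pvInv
  intro j
  simp only [Nat.zero_testBit, Bool.false_eq_true, false_iff]
  rintro ⟨_, h, _⟩
  omega

theorem pv_inv_step (cs t : List Char) (k : Nat) (D : Nat)
    (hk : k < cs.length) (hinv : pvInv cs t k D) :
    pvInv cs t (k+1) (((D <<< 1) ||| 1) &&& (fAltMask t).getD cs[k] 0) := by
  intro j
  rw [Nat.testBit_and, Nat.testBit_or, Nat.testBit_shiftLeft]
  have hone : Nat.testBit 1 j = decide ((0 : Nat) = j) := by
    rw [show (1 : Nat) = 2^0 from rfl, Nat.testBit_two_pow]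
  rw [hone]
  have hmask := pv_mask_bit t cs[k] j
  have hdrop : ∀ m : Nat, m ≤ k → (cs.take (k+1)).drop m = (cs.take k).drop m ++ [cs[k]] := by
    intro m hm
    rw [pv_take_succ cs k hk, List.drop_append_of_le_length (by simp [List.length_take]; omega)]
  cases j with
  | zero =>
    have hb : ((decide ((0 : Nat) ≥ 1) && D.testBit (0 - 1)) || decide ((0 : Nat) = 0)) = true := by
      simp
    rw [hb, Bool.true_and, hmask]
    have hw : (cs.take (k+1)).drop (k + 1 - (0 + 1)) = [cs[k]] := by
      rw [show k + 1 - (0 + 1) = k from rfl, hdrop k le_rfl]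
      simp
    rw [hw]
    constructor
    · intro h
      obtain ⟨hl0, he⟩ := List.getElem?_eq_some_iff.mp h
      refine ⟨hl0, by omega, ?_⟩
      cases t with
      | nil => simp at hl0
      | cons b t' => simp at he ⊢; exact he
    · rintro ⟨hl0, _, he⟩
      cases t with
      | nil => simp at hl0
      | cons b t' =>
        simp at he
        rw [List.getElem?_eq_getElem hl0]
        simp [he]
  | succ j' =>
    have hsh : ((decide (j' + 1 ≥ 1) && D.testBit (j' + 1 - 1)) || decide ((0 : Nat) = j' + 1))
        = D.testBit j' := by simp
    rw [hsh, Bool.and_eq_true, hmask, hinv j']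
    constructor
    · rintro ⟨⟨hjl, hjk, heq⟩, hch⟩
      obtain ⟨hjl', hche⟩ := List.getElem?_eq_some_iff.mp hch
      refine ⟨hjl', by omega, ?_⟩
      rw [show k + 1 - (j' + 1 + 1) = k - (j' + 1) from by omega,
          hdrop (k - (j' + 1)) (by omega), pv_take_succ t (j' + 1) hjl', ← heq, hche]
    · rintro ⟨hjl, hjk, heq⟩
      have hjl0 : j' < t.length := by omega
      rw [show k + 1 - (j' + 1 + 1) = k - (j' + 1) from by omega,
          hdrop (k - (j' + 1)) (by omega), pv_take_succ t (j' + 1) hjl] at heq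
      obtain ⟨h1, h2⟩ := List.append_inj' heq rfl
      have h2' : t[j' + 1] = cs[k] := by simpa using h2
      exact ⟨⟨hjl0, by omega, h1⟩, by rw [List.getElem?_eq_getElem hjl, h2']⟩

-- the A-side firing condition, phrased through pvWindow
theorem pv_cond (cs t : List Char) (k : Nat) (hk : k < cs.length) :
    (pvWindow cs t (k+1) = t) ↔
      ((PySem.Chars.len t) - 1 ≤ (k : Int) ∧
        PySem.List.slice cs (some ((k : Int) - PySem.Chars.len t + 1)) (some ((k : Int) + 1)) = t) := by
  simp only [PySem.Chars.len_eq]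
  by_cases hl : t.length ≤ k + 1
  · have hg : (t.length : Int) - 1 ≤ (k : Int) := by omega
    have h1 : (k : Int) - (t.length : Int) + 1 = ((k + 1 - t.length : Nat) : Int) := by
      push_cast [hl]; omega
    have h2 : (k : Int) + 1 = ((k + 1 : Nat) : Int) := by push_cast; ring
    rw [h1, h2, PySem.List.slice_natCast]
    have h3 : pvWindow cs t (k+1) = List.take (k + 1 - (k + 1 - t.length)) (List.drop (k + 1 - t.length) cs) := by
      simp only [pvWindow, List.drop_take]
    rw [h3]
    constructor
    · intro h; exact ⟨hg, h⟩
    · intro h; exact h.2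
  · constructor
    · intro h
      exfalso
      have : (pvWindow cs t (k+1)).length = t.length := by rw [h]
      simp only [pvWindow, List.length_drop, List.length_take] at this
      omega
    · intro h
      exfalso
      have h1 := h.1
      push_cast at h1
      omega

-- top bit of D fires exactly when the window equals t (t nonempty)
theorem pv_top_bit (cs t : List Char) (k : Nat) (D : Nat)
    (hl : t ≠ []) (hinv : pvInv cs t k D) :
    (D &&& (1 <<< (t.length - 1)) ≠ 0) ↔ (t.length ≤ k ∧ pvWindow cs t k = t) := by
  have hl0 : 0 < t.length := List.length_pos_of_ne_nil hl
  have hbit : (D &&& (1 <<< (t.length - 1)) ≠ 0) ↔ D.testBit (t.length - 1) = true := by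
    rw [Nat.shiftLeft_eq, one_mul, Nat.and_two_pow]
    cases h : D.testBit (t.length - 1) <;> simp
  rw [hbit, hinv (t.length - 1), show t.length - 1 + 1 = t.length from by omega]
  unfold pvWindow
  constructor
  · rintro ⟨_, h2, h3⟩
    exact ⟨h2, by rw [← h3, List.take_length]⟩
  · rintro ⟨h2, h3⟩
    exact ⟨by omega, h2, by rw [List.take_length]; exact h3.symm⟩

-- one aligned step of the two loops (t nonempty)
theorem pv_step (cs t : List Char) (st : Int × List String) (k : Nat) (D : Nat)
    (hk : k < cs.length) (hl : t ≠ []) (hinv : pvInv cs t k D) :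
    fAltStep (fAltMask t) (1 <<< (t.length - 1)) (D, st) cs[k] =
      ((((D <<< 1) ||| 1) &&& (fAltMask t).getD cs[k] 0), fStep cs t st (k : Int)) := by
  simp only [fAltStep, fStep]
  set D' := ((D <<< 1) ||| 1) &&& (fAltMask t).getD cs[k] 0 with hD'
  have hinv' : pvInv cs t (k+1) D' := pv_inv_step cs t k D hk hinv
  have htop := pv_top_bit cs t (k+1) D' hl hinv'
  have hcond := pv_cond cs t k hk
  by_cases hfire : D' &&& (1 <<< (t.length - 1)) ≠ 0
  · obtain ⟨hle, hw⟩ := htop.mp hfire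
    obtain ⟨hg, hs⟩ := hcond.mp hw
    rw [if_pos hfire, if_pos hg, if_pos hs]
  · rw [if_neg hfire]
    by_cases hg : (PySem.Chars.len t) - 1 ≤ (k : Int)
    · have hle : t.length ≤ k + 1 := by
        simp only [PySem.Chars.len_eq] at hg; omega
      have hs : ¬ PySem.List.slice cs (some ((k : Int) - PySem.Chars.len t + 1)) (some ((k : Int) + 1)) = t := by
        intro hs
        exact hfire (htop.mpr ⟨hle, hcond.mpr ⟨hg, hs⟩⟩)
      rw [if_pos hg, if_neg hs]
    · rw [if_neg hg]

-- main loop alignment for nonempty t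
theorem pv_main (cs t : List Char) (hl : t ≠ []) : ∀ (k : Nat), k ≤ cs.length →
    ∃ D : Nat, pvInv cs t k D ∧
      (cs.take k).foldl (fAltStep (fAltMask t) (1 <<< (t.length - 1))) (0, 0, []) =
        (D, (List.range k).foldl (fun st (j : Nat) => fStep cs t st (j : Int)) (0, [])) := by
  intro k
  induction k with
  | zero => intro _; exact ⟨0, pv_inv_zero cs t, by simp⟩
  | succ k ih =>
    intro hk'
    have hk : k < cs.length := by omega
    obtain ⟨D, hinv, heq⟩ := ih (le_of_lt hk)
    refine ⟨((D <<< 1) ||| 1) &&& (fAltMask t).getD cs[k] 0, pv_inv_step cs t k D hk hinv, ?_⟩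
    rw [pv_take_succ cs k hk, List.foldl_append, heq, List.range_succ, List.foldl_append]
    simp only [List.foldl_cons, List.foldl_nil]
    exact pv_step cs t _ k D hk hl hinv

-- A's step when T is empty: the match fires at every index
theorem pv_fStep_nil (cs : List Char) (st : Int × List String) (k : Nat) :
    fStep cs [] st (k : Int) = (st.1 + 1, st.2 ++ [PySem.Int.toStr (st.1 + 1)]) := by
  unfold fStep
  have hcond : (PySem.Chars.len ([] : List Char)) - 1 ≤ (k : Int) := by
    rw [PySem.Chars.len_eq]
    simp only [List.length_nil, Nat.cast_zero]
    omega
  have hs : PySem.List.slice cs (some ((k : Int) - PySem.Chars.len ([] : List Char) + 1)) (some ((k : Int) + 1)) = ([] : List Char) := by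
    rw [PySem.Chars.len_eq]
    simp only [List.length_nil, Nat.cast_zero, sub_zero]
    rw [show (k : Int) + 1 = ((k + 1 : Nat) : Int) from by push_cast; ring, PySem.List.slice_natCast]
    simp
  dsimp only
  rw [if_pos hcond, if_pos hs]

-- the empty-pattern case: A appends str(i+1) at every index
theorem pv_empty (cs : List Char) : ∀ (k : Nat),
    (List.range k).foldl (fun st (j : Nat) => fStep cs [] st (j : Int)) (0, []) =
      ((k : Int), (List.range k).map (fun j : Nat => PySem.Int.toStr ((j : Int) + 1))) := by
  intro k
  induction k with
  | zero => simp
  | succ k ih =>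
    rw [List.range_succ, List.foldl_append, ih]
    simp only [List.foldl_cons, List.foldl_nil, List.map_append, List.map_cons, List.map_nil]
    rw [pv_fStep_nil cs _ k]
    dsimp only
    rw [show ((k : Int) + 1) = ((k + 1 : Nat) : Int) from by push_cast; ring]

-- ===== VERDICT (by name: the statement is the Claim_ definition above) =====
theorem f_spec : Claim_equal_f := by
  intro S T _
  unfold Spec_f f f_alt
  dsimp only
  by_cases hl : T.toList.length = 0
  · rw [if_pos hl]
    have ht : T.toList = [] := List.eq_nil_of_length_eq_zero hl
    rw [ht, PySem.Chars.len_eq, PySem.List.pyRange_zero_natCast, List.foldl_map,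
        pv_empty S.toList S.toList.length, List.map_map]
    rfl
  · rw [if_neg hl]
    have ht : T.toList ≠ [] := fun h => hl (by simp [h])
    rw [PySem.Chars.len_eq, PySem.List.pyRange_zero_natCast, List.foldl_map]
    obtain ⟨D, _, heq⟩ := pv_main S.toList T.toList ht S.toList.length le_rfl
    rw [List.take_length] at heq
    rw [heq]
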